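-- pv_equiv track=rewrite | github.com/fjlic/IoT-Hotspot-Laravel | electronics_boards/erb_board/micropython/erb_dev.py | Block_ParseInt_Nfc
-- ===== SOURCE A (Python) =====
-- def Block_ParseInt_Nfc(str_block):
--     str_block = list(str_block) # list() hace una copia de la lista
--     for i in range(0,16):
--         if i < len(str_block):
--           str_block[i] = ord(str_block[i]) # regresa el unicode del caracter
--         else:
--           str_block.append(ord(' '))
--
--     return str_block
-- ===== SOURCE B (Python) =====
-- def Block_ParseInt_Nfc(str_block):
--     # Pad at the STRING level to width 16 first, then encode the whole thing
--     # to its byte values in one shot (exact ord values for ASCII input).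
--     return list(str_block.ljust(16).encode())
-- ===== Notes on version B (the rewrite author's own statement) =====
-- stated objective: simpler
-- what changed: Instead of A's 16-step indexed loop that mutates a list from chars to ints (or appends int pads), B pads at the string level with ljust(16) and then obtains all code values at once by encoding the padded string to bytes; no per-slot loop or branch exists in B.
import Mathlib
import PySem

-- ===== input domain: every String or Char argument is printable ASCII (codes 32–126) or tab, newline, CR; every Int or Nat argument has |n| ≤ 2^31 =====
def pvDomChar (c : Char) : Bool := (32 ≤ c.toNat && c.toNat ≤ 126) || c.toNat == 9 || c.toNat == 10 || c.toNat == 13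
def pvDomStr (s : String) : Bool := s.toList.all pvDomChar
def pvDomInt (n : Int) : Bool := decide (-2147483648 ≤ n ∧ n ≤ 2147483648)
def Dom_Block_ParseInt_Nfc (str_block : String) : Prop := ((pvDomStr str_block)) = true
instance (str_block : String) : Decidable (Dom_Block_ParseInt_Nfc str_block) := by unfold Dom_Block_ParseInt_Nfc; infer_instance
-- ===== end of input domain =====

-- B replaces A's 16-step mutate-or-append loop by pad-the-string-first (ljust) then encode; simpler, same cost.

-- ===== PORT A =====
-- A mutates a list that starts holding chars and gradually holds ints; modelled as List (Char ⊕ Int).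
def pvOrd : Char ⊕ Int → Int := Sum.elim (fun c => (c.toNat : Int)) id

def pvStep (s : List (Char ⊕ Int)) (i : Nat) : List (Char ⊕ Int) :=
  if i < s.length then s.set i (Sum.inr (pvOrd (s.getD i (Sum.inr 0)))) else s ++ [Sum.inr 32]

def Block_ParseInt_Nfc (str_block : String) : List Int :=
  -- 'for i in range(0,16)' over the mutable list; final map pvOrd only converts the
  -- (within Pre_ all-Int) cells to the Lean return type.
  (((List.range 16).foldl pvStep (str_block.toList.map Sum.inl)).map pvOrd)

-- ===== PORT B =====
-- str.ljust(16) ported by hand (PySem has no ljust): append spaces up to width 16 — exact.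
def pvLjust16 (cs : List Char) : List Char := cs ++ List.replicate (16 - cs.length) ' '
-- bytes of .encode(): for the ASCII domain each char encodes to the single byte c.toNat — exact on Dom.
def Block_ParseInt_Nfc_alt (str_block : String) : List Int :=
  (pvLjust16 str_block.toList).map (fun c => (c.toNat : Int))

-- ===== PRECONDITION & SPEC =====
-- Pre_ excludes strings longer than 16 characters: there A returns a MIXED Python list
-- (ints followed by the untouched tail characters), which is not a value of type List Int.
def Pre_Block_ParseInt_Nfc (str_block : String) : Prop := str_block.toList.length ≤ 16
instance (str_block : String) : Decidable (Pre_Block_ParseInt_Nfc str_block) := by unfold Pre_Block_ParseInt_Nfc; infer_instance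
def pvWitness_Block_ParseInt_Nfc : String := "abc"

def Spec_Block_ParseInt_Nfc (str_block : String) (out : List Int) : Prop := out = Block_ParseInt_Nfc_alt str_block
instance (str_block : String) (out : List Int) : Decidable (Spec_Block_ParseInt_Nfc str_block out) := by unfold Spec_Block_ParseInt_Nfc; infer_instance

-- ===== CLAIM (what is proved, stated in full; the proofs are below) =====
def Claim_equal_Block_ParseInt_Nfc : Prop := ∀ (str_block : String), Dom_Block_ParseInt_Nfc str_block → Pre_Block_ParseInt_Nfc str_block → Spec_Block_ParseInt_Nfc str_block (Block_ParseInt_Nfc str_block)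

-- ===== LEMMAS AND PROOFS =====

-- Loop invariant: after the first j iterations the list is the ord'd prefix, the
-- untouched char suffix, and (j - n) appended spaces (Nat subtraction: 0 while j ≤ n).
set_option maxRecDepth 4000 in
theorem pvLoop (cs : List Char) (j : Nat) :
    (List.range j).foldl pvStep (cs.map Sum.inl)
      = (cs.take j).map (fun c => Sum.inr ((c.toNat : Int)))
        ++ (cs.drop j).map Sum.inl
        ++ List.replicate (j - cs.length) (Sum.inr 32) := by
  induction j with
  | zero => simp
  | succ j ih =>
    rw [List.range_succ, List.foldl_append, ih]
    simp only [List.foldl_cons, List.foldl_nil]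
    by_cases h : j < cs.length
    · -- branch: set index j (which still holds a char)
      have hc : cs.drop j = cs[j] :: cs.drop (j + 1) := List.drop_eq_getElem_cons h
      have hlen : ((cs.take j).map (fun c => (Sum.inr (c.toNat : Int) : Char ⊕ Int))).length = j := by
        simp [List.length_take]; omega
      have hjn : j - cs.length = 0 := by omega
      simp only [pvStep, hjn, List.replicate_zero, List.append_nil, hc, List.map_cons]
      rw [if_pos (by simp [List.length_take]; omega)]
      rw [List.getD_eq_getElem?_getD, List.getElem?_append_right (by omega), hlen]
      simp only [Nat.sub_self]
      rw [List.set_append_right _ _ (by omega), hlen]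
      have h16 : j + 1 - cs.length = 0 := by omega
      simp only [Nat.sub_self, List.getElem?_cons_zero, Option.getD_some, List.set_cons_zero,
        pvOrd, Sum.elim_inl, h16, List.replicate_zero, List.append_nil]
      have htake : List.take (j + 1) (cs.map (fun c => (Sum.inr (c.toNat : Int) : Char ⊕ Int)))
          = List.take j (cs.map (fun c => (Sum.inr (c.toNat : Int) : Char ⊕ Int)))
            ++ [Sum.inr (cs[j].toNat : Int)] := by
        rw [List.take_add_one]
        rw [List.getElem?_map, List.getElem?_eq_getElem h]
        rfl
      rw [List.map_take, List.map_take, List.map_drop, htake, List.append_assoc]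
      rfl
    · -- branch: append a space
      have hjn : cs.length ≤ j := by omega
      rw [pvStep, if_neg (by simp [List.length_take]; omega)]
      have h1 : cs.take j = cs := List.take_of_length_le hjn
      have h2 : cs.take (j + 1) = cs := List.take_of_length_le (by omega)
      have h3 : cs.drop j = [] := List.drop_eq_nil_iff.mpr hjn
      have h4 : cs.drop (j + 1) = [] := List.drop_eq_nil_iff.mpr (by omega)
      have h5 : j + 1 - cs.length = (j - cs.length) + 1 := by omega
      rw [h1, h2, h3, h4, h5, List.replicate_succ']
      simp

-- ===== VERDICT (by name: the statement is the Claim_ definition above) =====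
theorem Block_ParseInt_Nfc_spec : Claim_equal_Block_ParseInt_Nfc := by
  intro s _ hpre
  unfold Spec_Block_ParseInt_Nfc Block_ParseInt_Nfc Block_ParseInt_Nfc_alt pvLjust16
  rw [pvLoop]
  have hpre' : s.toList.length ≤ 16 := hpre
  have h1 : s.toList.take 16 = s.toList := List.take_of_length_le hpre'
  have h2 : s.toList.drop 16 = [] := List.drop_eq_nil_iff.mpr hpre'
  simp [h1, h2, pvOrd, List.map_replicate]
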